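-- pv_equiv track=rewrite | github.com/Kotlet776/My_pyton_learning_repository | projects/analyzing_numbers/analyzer.py | read_numbers
-- ===== SOURCE A (Python) =====
-- def read_numbers(lines) -> tuple:
--     """
--     Docstring for read_numbers
--     Function checks if the value is a number.
--     Returns a list of numbers.
--     """
--
--     numbers = []
--     count_unable_to_convert = 0
--     for i in lines:
--         try:
--             i = str(i).strip()
--             if i == "":
--                 continue
--             i = int(i)
--             numbers.append(i)
--         except ValueError:
--             count_unable_to_convert +=1
--             continue
--
--     return(numbers, count_unable_to_convert)
-- ===== SOURCE B (Python) =====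
-- def read_numbers(lines) -> tuple:
--     # Consume the lines as a worklist popped from the end (LIFO); numbers are
--     # accumulated back-to-front and reversed once at the end. Order of the
--     # failure count does not matter, order of numbers is restored by reverse().
--     stack = list(lines)
--     numbers = []
--     count_unable_to_convert = 0
--     while stack:
--         t = str(stack.pop()).strip()
--         if t == "":
--             continue
--         try:
--             numbers.append(int(t))
--         except ValueError:
--             count_unable_to_convert += 1
--     numbers.reverse()
--     return (numbers, count_unable_to_convert)
-- ===== Notes on version B (the rewrite author's own statement) =====
-- stated objective: alternative
-- what changed: B traverses the lines in the opposite direction, consuming a copied worklist with stack.pop() (LIFO) and building the numbers back-to-front, then reverses once; the Lean proof shows the failure count is order-independent and the reversal restores input order.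
import Mathlib
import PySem

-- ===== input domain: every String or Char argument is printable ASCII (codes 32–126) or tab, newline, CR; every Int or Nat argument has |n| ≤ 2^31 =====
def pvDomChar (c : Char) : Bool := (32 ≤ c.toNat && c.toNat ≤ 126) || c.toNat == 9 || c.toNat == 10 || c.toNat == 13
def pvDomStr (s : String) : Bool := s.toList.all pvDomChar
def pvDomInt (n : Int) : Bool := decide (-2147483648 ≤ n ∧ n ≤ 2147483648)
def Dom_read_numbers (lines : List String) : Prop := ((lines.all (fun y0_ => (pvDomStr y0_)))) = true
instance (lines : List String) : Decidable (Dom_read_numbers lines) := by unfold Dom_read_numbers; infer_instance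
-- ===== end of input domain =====

-- B consumes the lines as a worklist popped from the end (opposite traversal
-- order), building the numbers back-to-front and reversing once; objective:
-- alternative decomposition, same cost.

-- ===== PORT A =====
-- A: one forward loop, state (numbers, count_unable_to_convert)
def pvStepA (s : List Int × Int) (i : String) : List Int × Int :=
  let t := PySem.Str.strip i
  if t = "" then s
  else
    match PySem.Int.ofStr? t with
    | some n => (s.1 ++ [n], s.2)
    | none => (s.1, s.2 + 1)

def read_numbers (lines : List String) : List Int × Int :=
  lines.foldl pvStepA ([], 0)

-- ===== PORT B =====
-- B's while loop: pop the last line off `stack` (strip, skip blank,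
-- try int / except count), over the state (numbers-reversed-so-far, fails)
def pvLoopB (stack : List String) (numbers : List Int) (fails : Int) : List Int × Int :=
  if hs : stack = [] then (numbers, fails)
  else
    let t := PySem.Str.strip (stack.getLast hs)
    let s : List Int × Int :=
      if t = "" then (numbers, fails)
      else
        match PySem.Int.ofStr? t with
        | some n => (numbers ++ [n], fails)
        | none => (numbers, fails + 1)
    pvLoopB stack.dropLast s.1 s.2
termination_by stack.length
decreasing_by
  simp only [List.length_dropLast]
  exact Nat.sub_lt (List.length_pos_iff.mpr hs) one_pos

def read_numbers_alt (lines : List String) : List Int × Int :=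
  let r := pvLoopB lines [] 0
  (r.1.reverse, r.2)

-- ===== PRECONDITION & SPEC =====
def Spec_read_numbers (lines : List String) (out : List Int × Int) : Prop := out = read_numbers_alt lines
instance (lines : List String) (out : List Int × Int) : Decidable (Spec_read_numbers lines out) := by unfold Spec_read_numbers; infer_instance

-- ===== CLAIM =====
def Claim_equal_read_numbers : Prop := ∀ (lines : List String), Dom_read_numbers lines → Spec_read_numbers lines (read_numbers lines)

-- ===== LEMMAS AND PROOFS =====

-- characterisation helpers: the non-blank stripped tokens, and those that convert
def pvTokens (lines : List String) : List String :=
  (lines.map (fun i => PySem.Str.strip i)).filter (fun t => t ≠ "")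

def pvNumbers (lines : List String) : List Int :=
  ((pvTokens lines).map (fun t => PySem.Int.ofStr? t)).filterMap id

theorem pvTokens_cons_skip {i : String} (rest : List String)
    (h : PySem.Str.strip i = "") : pvTokens (i :: rest) = pvTokens rest := by
  simp [pvTokens, h]

theorem pvTokens_cons_keep {i : String} (rest : List String)
    (h : ¬ PySem.Str.strip i = "") :
    pvTokens (i :: rest) = PySem.Str.strip i :: pvTokens rest := by
  simp [pvTokens, h]

theorem pvNumbers_cons_skip {i : String} (rest : List String)
    (h : PySem.Str.strip i = "") : pvNumbers (i :: rest) = pvNumbers rest := by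
  simp [pvNumbers, pvTokens_cons_skip rest h]

theorem pvNumbers_cons_some {i : String} (rest : List String) {n : Int}
    (h : ¬ PySem.Str.strip i = "")
    (hn : PySem.Int.ofStr? (PySem.Str.strip i) = some n) :
    pvNumbers (i :: rest) = n :: pvNumbers rest := by
  simp [pvNumbers, pvTokens_cons_keep rest h, hn]

theorem pvNumbers_cons_none {i : String} (rest : List String)
    (h : ¬ PySem.Str.strip i = "")
    (hn : PySem.Int.ofStr? (PySem.Str.strip i) = none) :
    pvNumbers (i :: rest) = pvNumbers rest := by
  simp [pvNumbers, pvTokens_cons_keep rest h, hn]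

theorem read_numbers_loop (lines : List String) (a : List Int) (c : Int) :
    lines.foldl pvStepA (a, c)
    = (a ++ pvNumbers lines,
       c + (((pvTokens lines).length : Int) - ((pvNumbers lines).length : Int))) := by
  induction lines generalizing a c with
  | nil => simp [pvNumbers, pvTokens]
  | cons i rest ih =>
    simp only [List.foldl_cons]
    by_cases h : PySem.Str.strip i = ""
    · rw [show pvStepA (a, c) i = (a, c) by simp [pvStepA, h], ih, pvTokens_cons_skip rest h, pvNumbers_cons_skip rest h]
    · cases hn : PySem.Int.ofStr? (PySem.Str.strip i) with
      | some n =>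
        rw [show pvStepA (a, c) i = (a ++ [n], c) by simp [pvStepA, h, hn], ih, pvTokens_cons_keep rest h, pvNumbers_cons_some rest h hn]
        simp only [List.length_cons, Prod.mk.injEq]
        exact ⟨by simp, by push_cast; ring⟩
      | none =>
        rw [show pvStepA (a, c) i = (a, c + 1) by simp [pvStepA, h, hn], ih, pvTokens_cons_keep rest h, pvNumbers_cons_none rest h hn]
        simp only [List.length_cons, Prod.mk.injEq]
        exact ⟨trivial, by push_cast; ring⟩

theorem pvLoopB_char (stack : List String) (a : List Int) (c : Int) :
    pvLoopB stack a c
    = (a ++ (pvNumbers stack).reverse,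
       c + (((pvTokens stack).length : Int) - ((pvNumbers stack).length : Int))) := by
  induction stack using List.reverseRecOn generalizing a c with
  | nil =>
    rw [pvLoopB]
    simp [pvNumbers, pvTokens]
  | append_singleton ys x ih =>
    rw [pvLoopB]
    have hne : ys ++ [x] ≠ [] := by simp
    rw [dif_neg hne]
    have hx : (ys ++ [x]).getLast hne = x := by simp
    rw [List.dropLast_concat, hx]
    by_cases h : PySem.Str.strip x = ""
    · simp only [h, if_pos rfl]
      rw [ih]
      simp [pvTokens, pvNumbers, h]
    · cases hn : PySem.Int.ofStr? (PySem.Str.strip x) with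
      | some n =>
        simp only [if_neg h, hn]
        rw [ih]
        have hT : pvTokens (ys ++ [x]) = pvTokens ys ++ [PySem.Str.strip x] := by
          simp [pvTokens, h]
        have hN : pvNumbers (ys ++ [x]) = pvNumbers ys ++ [n] := by
          simp [pvNumbers, pvTokens, h, hn]
        rw [hT, hN]
        simp only [List.reverse_append, List.reverse_cons, List.reverse_nil,
          List.nil_append, List.length_append, List.length_cons, List.length_nil,
          Prod.mk.injEq, List.cons_append]
        constructor
        · simp
        · push_cast; ring
      | none =>
        simp only [if_neg h, hn]
        rw [ih]
        have hT : pvTokens (ys ++ [x]) = pvTokens ys ++ [PySem.Str.strip x] := by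
          simp [pvTokens, h]
        have hN : pvNumbers (ys ++ [x]) = pvNumbers ys := by
          simp [pvNumbers, pvTokens, h, hn]
        rw [hT, hN]
        simp only [List.length_append, List.length_cons, List.length_nil,
          Prod.mk.injEq]
        exact ⟨by simp, by push_cast; ring⟩

-- ===== VERDICT =====
theorem read_numbers_spec : Claim_equal_read_numbers := by
  intro lines _
  unfold Spec_read_numbers read_numbers read_numbers_alt
  rw [read_numbers_loop, pvLoopB_char]
  simp
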